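-- pv_equiv track=rewrite | github.com/xiaollz/tennis_analyzer | scripts/epub_pipeline/pdf_extractor.py | _associate_captions
-- ===== SOURCE A (Python) =====
-- def _associate_captions(elements: list[dict]) -> list[dict]:
--     """
--     Associate figcaption elements with preceding img elements.
--
--     If a figcaption immediately follows an img on the same page,
--     set the img's caption and remove the figcaption element.
--     """
--     result = []
--     i = 0
--     while i < len(elements):
--         el = elements[i]
--         if el["type"] == "img" and i + 1 < len(elements):
--             next_el = elements[i + 1]
--             if next_el["type"] == "figcaption" and next_el["page"] == el["page"]:
--                 el["caption"] = next_el["text"]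
--                 result.append(el)
--                 i += 2
--                 continue
--         result.append(el)
--         i += 1
--     return result
-- ===== SOURCE B (Python) =====
-- def _associate_captions(elements: list[dict]) -> list[dict]:
--     """
--     Associate figcaption elements with preceding img elements.
--
--     Single forward pass with a look-behind flag: instead of peeking at
--     elements[i + 1] and skipping the index, we remember whether the last
--     appended element is an img still eligible for a caption and mutate
--     result[-1] when a matching figcaption arrives.
--     """
--     result = []
--     eligible = False
--     for el in elements:
--         t = el["type"]
--         if eligible and t == "figcaption" and el["page"] == result[-1]["page"]:
--             result[-1]["caption"] = el["text"]
--             eligible = False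
--         else:
--             result.append(el)
--             eligible = t == "img"
--     return result
-- ===== Notes on version B (the rewrite author's own statement) =====
-- stated objective: simpler
-- what changed: Replaces the index-based while loop with look-ahead (i += 2 skip) by a single forward for-loop that keeps a look-behind eligibility flag and mutates result[-1] when a matching figcaption follows an img.
import Mathlib
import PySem

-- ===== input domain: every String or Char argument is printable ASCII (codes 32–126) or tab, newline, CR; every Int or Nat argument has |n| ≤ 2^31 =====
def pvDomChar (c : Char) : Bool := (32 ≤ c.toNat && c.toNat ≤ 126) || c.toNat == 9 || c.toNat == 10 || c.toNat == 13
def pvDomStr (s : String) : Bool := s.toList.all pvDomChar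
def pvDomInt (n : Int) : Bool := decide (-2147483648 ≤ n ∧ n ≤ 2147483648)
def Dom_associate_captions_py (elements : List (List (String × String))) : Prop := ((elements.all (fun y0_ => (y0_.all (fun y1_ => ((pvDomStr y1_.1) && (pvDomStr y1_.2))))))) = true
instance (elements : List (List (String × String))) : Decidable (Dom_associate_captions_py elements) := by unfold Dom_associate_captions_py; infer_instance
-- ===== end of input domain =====

-- B replaces A's look-ahead index skip (i += 2) by a single forward pass with a
-- look-behind eligibility flag (objective: simpler). Both Pythons mutate the paired
-- img dict in place (setting "caption"); the theorems are about the RETURN value.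

-- dict lookup el.get(k) and assignment el[k] = v, via PySem.Dict
def dget (d : List (String × String)) (k : String) : Option String := (PySem.Dict.mk d).get? k

def dset (d : List (String × String)) (k v : String) : List (String × String) :=
  ((PySem.Dict.mk d).insert k v).items

-- ===== PORT A =====
-- A's while loop over index i (advancing by 1 or 2) as recursion on the suffix
def goA : List (List (String × String)) → List (List (String × String))
  | [] => []
  | el :: rest =>
    if dget el "type" = some "img" then
      match rest with
      | next :: rest2 =>
        if dget next "type" = some "figcaption" ∧ dget next "page" = dget el "page" then
          dset el "caption" ((dget next "text").getD "") :: goA rest2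
        else
          el :: goA (next :: rest2)
      | [] => el :: goA []
    else
      el :: goA rest

def associate_captions_py (elements : List (List (String × String))) : List (List (String × String)) :=
  goA elements

-- ===== PORT B =====
-- one step of B's for-loop body: state = (result, reversed, and the eligibility flag)
def stepB (st : List (List (String × String)) × Bool) (el : List (String × String)) :
    List (List (String × String)) × Bool :=
  if st.2 then
    match st.1 with
    | prev :: accRest =>
      if dget el "type" = some "figcaption" ∧ dget el "page" = dget prev "page" then
        (dset prev "caption" ((dget el "text").getD "") :: accRest, false)
      else (el :: st.1, decide (dget el "type" = some "img"))
    | [] => (el :: st.1, decide (dget el "type" = some "img"))  -- unreachable: flag set only after an append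
  else (el :: st.1, decide (dget el "type" = some "img"))

def associate_captions_py_alt (elements : List (List (String × String))) : List (List (String × String)) :=
  (elements.foldl stepB ([], false)).1.reverse

-- ===== PRECONDITION & SPEC =====
-- Pre_ is exactly the set of inputs on which the Python A returns: A raises KeyError
-- when an element lacks "type", when an adjacent img/figcaption pair lacks "page",
-- or when a same-page figcaption of such a pair lacks "text".
def Pre_associate_captions_py (elements : List (List (String × String))) : Prop :=
  (∀ el ∈ elements, (dget el "type").isSome) ∧
  (∀ p ∈ elements.zip elements.tail,
    dget p.1 "type" = some "img" → dget p.2 "type" = some "figcaption" →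
      (dget p.1 "page").isSome ∧ (dget p.2 "page").isSome ∧
      (dget p.2 "page" = dget p.1 "page" → (dget p.2 "text").isSome))

instance (elements : List (List (String × String))) : Decidable (Pre_associate_captions_py elements) := by
  unfold Pre_associate_captions_py; infer_instance

def pvWitness_associate_captions_py : (List (List (String × String))) :=
  [[("type", "img"), ("page", "1")], [("type", "figcaption"), ("page", "1"), ("text", "cap")]]

def Spec_associate_captions_py (elements : List (List (String × String))) (out : List (List (String × String))) : Prop := out = associate_captions_py_alt elements
instance (elements : List (List (String × String))) (out : List (List (String × String))) : Decidable (Spec_associate_captions_py elements out) := by unfold Spec_associate_captions_py; infer_instance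

-- ===== CLAIM (what is proved, stated in full; the proofs are below) =====
def Claim_equal_associate_captions_py : Prop := ∀ (elements : List (List (String × String))), Dom_associate_captions_py elements → Pre_associate_captions_py elements → Spec_associate_captions_py elements (associate_captions_py elements)

-- ===== LEMMAS AND PROOFS =====

-- joint invariant of B's fold, by induction on a length bound n:
--  (1) flag down: the fold appends exactly goA of the remaining elements;
--  (2) flag up with el (an img) the last appended element: it appends goA (el :: rest).
theorem foldB_inv (n : ℕ) :
    (∀ (elements acc : List (List (String × String))), elements.length ≤ n →
      (elements.foldl stepB (acc, false)).1.reverse = acc.reverse ++ goA elements) ∧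
    (∀ (rest acc : List (List (String × String))) (el : List (String × String)),
      rest.length ≤ n → dget el "type" = some "img" →
      (rest.foldl stepB (el :: acc, true)).1.reverse = acc.reverse ++ goA (el :: rest)) := by
  induction n with
  | zero =>
    refine ⟨fun elements acc h => ?_, fun rest acc el h himg => ?_⟩
    · cases elements with
      | nil => simp [goA]
      | cons a l => simp at h
    · cases rest with
      | nil => simp [goA, himg]
      | cons a l => simp at h
  | succ n ih =>
    refine ⟨fun elements acc h => ?_, fun rest acc el h himg => ?_⟩
    · match elements with
      | [] => simp [goA]
      | el :: rest =>
        simp only [List.length_cons, Nat.add_le_add_iff_right] at h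
        simp only [List.foldl_cons, stepB, Bool.false_eq_true, if_false]
        by_cases himg : dget el "type" = some "img"
        · simp only [himg, decide_true]
          rw [ih.2 rest acc el h himg]
        · simp only [himg, decide_false]
          rw [ih.1 rest (el :: acc) h]
          cases rest <;> simp [goA, himg]
    · match rest with
      | [] => simp [goA, himg]
      | next :: rest2 =>
        simp only [List.length_cons, Nat.add_le_add_iff_right] at h
        simp only [List.foldl_cons, stepB, if_true]
        by_cases hpair : dget next "type" = some "figcaption" ∧ dget next "page" = dget el "page"
        · rw [if_pos hpair]
          rw [ih.1 rest2 (dset el "caption" ((dget next "text").getD "") :: acc) h]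
          simp [goA, himg, hpair]
        · rw [if_neg hpair]
          by_cases himg2 : dget next "type" = some "img"
          · simp only [himg2, decide_true]
            rw [ih.2 rest2 (el :: acc) next h himg2]
            simp [goA, himg, hpair]
          · simp only [himg2, decide_false]
            rw [ih.1 rest2 (next :: el :: acc) h]
            cases rest2 <;> simp [goA, himg, himg2, hpair]

-- ===== VERDICT (by name: the statement is the Claim_ definition above) =====
theorem associate_captions_py_spec : Claim_equal_associate_captions_py := by
  intro elements _ _
  unfold Spec_associate_captions_py associate_captions_py associate_captions_py_alt
  rw [(foldB_inv elements.length).1 elements [] (le_refl _)]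
  simp
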